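-- pv_equiv track=rewrite | github.com/xl666/recursosEstructuras24 | parcial2/estudiantes/Amacalli/Parcial2_SEC/cuantosCeros.py | contar_recursivo
-- ===== SOURCE A (Python) =====
-- def contar_recursivo(cadena: str, cont: int) -> int:
--     """
--     Cuenta cuantos ceros hay en la cadena binaria
--     """
--     if not cadena:
--         return cont
--
--     frente = cadena[0]
--     resto = cadena[1:]
--
--     if frente == '0':
--         cont = cont + 1
--
--     return contar_recursivo(resto, cont)
-- ===== SOURCE B (Python) =====
-- def contar_recursivo(cadena: str, cont: int) -> int:
--     """
--     Cuenta cuantos ceros hay en la cadena binaria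
--     """
--     for c in cadena:
--         if c == '0':
--             cont += 1
--     return cont
-- ===== Notes on version B (the rewrite author's own statement) =====
-- stated objective: simpler
-- what changed: Replaces the accumulator-passing recursion (and its per-step slicing cadena[1:]) with a direct for-loop over the characters that increments cont in place.
import Mathlib
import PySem

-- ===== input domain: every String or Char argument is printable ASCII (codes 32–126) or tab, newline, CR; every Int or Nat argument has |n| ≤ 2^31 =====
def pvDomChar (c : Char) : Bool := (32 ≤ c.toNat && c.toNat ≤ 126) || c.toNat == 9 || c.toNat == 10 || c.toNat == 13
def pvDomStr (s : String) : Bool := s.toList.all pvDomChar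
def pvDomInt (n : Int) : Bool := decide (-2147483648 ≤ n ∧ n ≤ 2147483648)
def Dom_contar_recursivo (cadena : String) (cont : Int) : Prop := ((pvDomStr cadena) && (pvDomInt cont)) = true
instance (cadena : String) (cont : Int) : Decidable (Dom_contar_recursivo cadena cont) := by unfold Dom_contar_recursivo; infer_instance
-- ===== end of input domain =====

-- B replaces A's accumulator recursion (with per-step slicing) by a direct for-loop over the characters: simpler and avoids repeated slicing.


-- ===== PORT A =====
-- A's recursion on cadena[0] / cadena[1:], transcribed as structural recursion on the char list
def contarRecA : List Char → Int → Int
  | [], cont => cont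
  | frente :: resto, cont => contarRecA resto (if frente = '0' then cont + 1 else cont)

def contar_recursivo (cadena : String) (cont : Int) : Int :=
  contarRecA cadena.toList cont

-- ===== PORT B =====
-- B's for-loop over the characters, as a foldl with accumulator cont
def contar_recursivo_alt (cadena : String) (cont : Int) : Int :=
  cadena.toList.foldl (fun cont c => if c = '0' then cont + 1 else cont) cont

-- ===== PRECONDITION & SPEC =====
def Spec_contar_recursivo (cadena : String) (cont : Int) (out : Int) : Prop := out = contar_recursivo_alt cadena cont
instance (cadena : String) (cont : Int) (out : Int) : Decidable (Spec_contar_recursivo cadena cont out) := by unfold Spec_contar_recursivo; infer_instance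

-- ===== CLAIM (what is proved, stated in full; the proofs are below) =====
def Claim_equal_contar_recursivo : Prop := ∀ (cadena : String) (cont : Int), Dom_contar_recursivo cadena cont → Spec_contar_recursivo cadena cont (contar_recursivo cadena cont)

-- ===== LEMMAS AND PROOFS =====

-- ===== VERDICT =====
-- (lemma above the verdict)
theorem contarRecA_eq_foldl (l : List Char) (cont : Int) :
    contarRecA l cont = l.foldl (fun cont c => if c = '0' then cont + 1 else cont) cont := by
  induction l generalizing cont with
  | nil => rfl
  | cons c l ih => simp [contarRecA, List.foldl, ih]

theorem contar_recursivo_spec : Claim_equal_contar_recursivo := by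
  intro cadena cont _
  unfold Spec_contar_recursivo contar_recursivo contar_recursivo_alt
  exact contarRecA_eq_foldl _ _
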